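-- pv_equiv track=rewrite | github.com/ablab/IsoQuant | src/transcript_splice_site_corrector.py | sublist_largest_values_exists
-- ===== SOURCE A (Python) =====
-- def sublist_largest_values_exists(lst, n):
--     """
--         Verifies that there is a sublist of size n that contains the largest values in the list.
--         Not currently in use, but may be included in the error prediction strategy for stricter prediction.
--     Args:
--         lst (int): list of deletion distribution
--         n (int): most common case of deletions
--
--     Returns:
--         _type_: _description_
--     """
--     largest_values = set(sorted(lst, reverse=True)[:n])
--     count = 0
--
--     for num in lst:
--         if num in largest_values:
--             count += 1
--             if count >= n:
--                 return True
--         else: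
--             count = 0
--
--     return False
-- ===== SOURCE B (Python) =====
-- def _nth_largest(xs, k):
--     # iterative quickselect: the k-th largest value of xs (k 0-based), no sorting
--     while True:
--         p = xs[len(xs) // 2]
--         greater = [y for y in xs if y > p]
--         if k < len(greater):
--             xs = greater
--             continue
--         equal = sum(1 for y in xs if y == p)
--         if k < len(greater) + equal:
--             return p
--         k -= len(greater) + equal
--         xs = [y for y in xs if y < p]
--
--
-- def sublist_largest_values_exists(lst, n):
--     # Quickselect the n-th largest value as a threshold (no sort, no set),
--     # then take the longest run of elements reaching it.
--     if n <= 0 or n > len(lst):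
--         return False
--     t = _nth_largest(lst, n - 1)
--     best = cur = 0
--     for x in lst:
--         cur = cur + 1 if x >= t else 0
--         if cur > best:
--             best = cur
--     return best >= n
-- ===== Notes on version B (the rewrite author's own statement) =====
-- stated objective: alternative
-- what changed: B never sorts and builds no set: it finds the n-th largest value with an iterative quickselect (three-way partition around a middle pivot) and uses it as a threshold, then computes the longest run of qualifying elements in a staged scan decided at the end, instead of A's sort + top-n slice set + early-return run counter.
-- outside the precondition, e.g. on sublist_largest_values_exists([1, 2, 3], -1): A returns True, B returns False; on sublist_largest_values_exists([1], -1): A returns False, B returns False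
import Mathlib
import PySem

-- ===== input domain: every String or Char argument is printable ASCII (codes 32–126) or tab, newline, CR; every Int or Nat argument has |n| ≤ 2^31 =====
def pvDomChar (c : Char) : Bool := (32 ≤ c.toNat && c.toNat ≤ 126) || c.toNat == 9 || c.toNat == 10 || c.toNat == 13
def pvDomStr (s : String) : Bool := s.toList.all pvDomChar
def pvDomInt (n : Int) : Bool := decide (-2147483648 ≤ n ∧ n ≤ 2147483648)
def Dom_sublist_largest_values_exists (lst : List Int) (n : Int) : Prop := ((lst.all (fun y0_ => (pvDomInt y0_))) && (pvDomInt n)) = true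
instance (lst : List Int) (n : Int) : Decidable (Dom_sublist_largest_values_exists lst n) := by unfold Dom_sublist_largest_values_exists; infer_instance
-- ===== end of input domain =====

-- B finds the n-th largest value by quickselect (three-way partitioning, no sort and no set)
-- and then takes the longest run of elements reaching that threshold.


-- ===== PORT A =====
-- the for-loop of A with early return: state = count
def pvLoopA (largest : PySem.Set Int) (n : Int) : List Int → Int → Bool
  | [], _ => false
  | num :: rest, count =>
      if PySem.Set.contains largest num then
        -- count += 1; if count >= n: return True
        if n ≤ count + 1 then true else pvLoopA largest n rest (count + 1)
      else pvLoopA largest n rest 0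

def sublist_largest_values_exists (lst : List Int) (n : Int) : Bool :=
  let largest_values : PySem.Set Int :=
    PySem.Set.ofList (PySem.List.slice (PySem.List.sorted lst (fun x => x) true) none (some n))
  pvLoopA largest_values n lst 0

-- ===== PORT B =====
-- [y for y in xs if y > p] and [y for y in xs if y < p]
def pvFilterGt (p : Int) (xs : List Int) : List Int := xs.filter (fun y => decide (p < y))
def pvFilterLt (p : Int) (xs : List Int) : List Int := xs.filter (fun y => decide (y < p))

-- the pivot xs[len(xs) // 2] lies in xs (cited by the port's decreasing_by)
theorem pvPivot_mem (xs : List Int) (h : ¬ xs.length = 0) : xs.getD (xs.length / 2) 0 ∈ xs := by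
  rw [List.getD_eq_getElem xs 0 (Nat.div_lt_self (by omega) (by omega))]
  exact List.getElem_mem _

theorem pvFilterGt_length_lt (p : Int) (xs : List Int) (h : p ∈ xs) :
    (pvFilterGt p xs).length < xs.length :=
  List.length_filter_lt_length_iff_exists.mpr ⟨p, h, by simp⟩

theorem pvFilterLt_length_lt (p : Int) (xs : List Int) (h : p ∈ xs) :
    (pvFilterLt p xs).length < xs.length :=
  List.length_filter_lt_length_iff_exists.mpr ⟨p, h, by simp⟩

-- the iterative quickselect loop of _nth_largest: k-th largest value of xs, 0-based.
-- xs[len(xs) // 2] is ported as xs.getD (xs.length / 2) 0, exact for nonempty xs;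
-- the empty arm is unreachable from B's guarded call (Python would raise IndexError there).
def pvNthLargest (xs : List Int) (k : Nat) : Int :=
  if hxs : xs.length = 0 then 0
  else
    if k < (pvFilterGt (xs.getD (xs.length / 2) 0) xs).length then
      pvNthLargest (pvFilterGt (xs.getD (xs.length / 2) 0) xs) k
    else if k < (pvFilterGt (xs.getD (xs.length / 2) 0) xs).length +
        xs.countP (fun y => decide (y = xs.getD (xs.length / 2) 0)) then
      xs.getD (xs.length / 2) 0
    else
      pvNthLargest (pvFilterLt (xs.getD (xs.length / 2) 0) xs)
        (k - ((pvFilterGt (xs.getD (xs.length / 2) 0) xs).length +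
          xs.countP (fun y => decide (y = xs.getD (xs.length / 2) 0))))
termination_by xs.length
decreasing_by
  · exact pvFilterGt_length_lt _ _ (pvPivot_mem xs hxs)
  · exact pvFilterLt_length_lt _ _ (pvPivot_mem xs hxs)

-- one step of B's run scan: cur = cur + 1 if x >= t else 0; if cur > best: best = cur
def pvRunStep (t : Int) (bc : Int × Int) (x : Int) : Int × Int :=
  let cur := if t ≤ x then bc.2 + 1 else 0
  (if bc.1 < cur then cur else bc.1, cur)

def sublist_largest_values_exists_alt (lst : List Int) (n : Int) : Bool :=
  if n ≤ 0 ∨ (lst.length : Int) < n then false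
  else
    let t := pvNthLargest lst (n - 1).toNat
    let best := (lst.foldl (pvRunStep t) (0, 0)).1
    decide (n ≤ best)

-- ===== PRECONDITION & SPEC =====
-- Pre_ excludes negative n, outside the function's natural domain (n is a run length / count);
-- there A's result is an artefact of Python's negative slicing lst[:n], which B does not mimic.
def Pre_sublist_largest_values_exists (lst : List Int) (n : Int) : Prop := 0 ≤ n
instance (lst : List Int) (n : Int) : Decidable (Pre_sublist_largest_values_exists lst n) := by
  unfold Pre_sublist_largest_values_exists; infer_instance

def pvWitness_sublist_largest_values_exists : List Int × Int := ([2, 1, 2, 2], 2)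

def Spec_sublist_largest_values_exists (lst : List Int) (n : Int) (out : Bool) : Prop :=
  out = sublist_largest_values_exists_alt lst n
instance (lst : List Int) (n : Int) (out : Bool) : Decidable (Spec_sublist_largest_values_exists lst n out) := by
  unfold Spec_sublist_largest_values_exists; infer_instance

-- ===== CLAIM (what is proved, stated in full; the proofs are below) =====
def Claim_equal_sublist_largest_values_exists : Prop :=
  ∀ (lst : List Int) (n : Int), Dom_sublist_largest_values_exists lst n →
    Pre_sublist_largest_values_exists lst n →
    Spec_sublist_largest_values_exists lst n (sublist_largest_values_exists lst n)

-- ===== LEMMAS AND PROOFS =====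

-- A's loop returns false when no element is in the set (the n = 0 case).
theorem pvLoopA_of_none (s : PySem.Set Int) (n : Int) :
    ∀ (xs : List Int) (c : Int), (∀ x ∈ xs, PySem.Set.contains s x = false) →
      pvLoopA s n xs c = false := by
  intro xs
  induction xs with
  | nil => intro c _; rfl
  | cons x xs ih =>
      intro c h
      simp only [pvLoopA, h x (by simp)]
      exact ih 0 (fun y hy => h y (by simp [hy]))

-- A's loop returns false when the list is too short to reach count = n.
theorem pvLoopA_short (s : PySem.Set Int) (n : Int) :
    ∀ (xs : List Int) (c : Int), 0 ≤ c → c + (xs.length : Int) < n →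
      pvLoopA s n xs c = false := by
  intro xs
  induction xs with
  | nil => intro c _ _; rfl
  | cons x xs ih =>
      intro c hc hlen
      simp only [List.length_cons] at hlen
      by_cases hx : PySem.Set.contains s x
      · simp only [pvLoopA, hx, if_true]
        rw [if_neg (by push_cast at hlen ⊢; omega)]
        exact ih (c + 1) (by omega) (by push_cast at hlen ⊢; omega)
      · simp only [pvLoopA, hx, if_false, Bool.false_eq_true]
        exact ih 0 (by omega) (by push_cast at hlen ⊢; omega)

theorem pvRunStep_true (t b c x : Int) (hx : t ≤ x) :
    pvRunStep t (b, c) x = (if b < c + 1 then c + 1 else b, c + 1) := by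
  simp [pvRunStep, hx]

theorem pvRunStep_false (t b c x : Int) (hx : ¬ t ≤ x) :
    pvRunStep t (b, c) x = (if b < 0 then 0 else b, 0) := by
  simp [pvRunStep, hx]

-- B's run scan never decreases the running maximum.
theorem pvFoldB_fst_ge (t : Int) :
    ∀ (xs : List Int) (b c : Int), b ≤ (xs.foldl (pvRunStep t) (b, c)).1 := by
  intro xs
  induction xs with
  | nil => intro b c; simp
  | cons x xs ih =>
      intro b c
      rw [List.foldl_cons]
      have h2 : b ≤ (pvRunStep t (b, c) x).1 := by
        by_cases hx : t ≤ x
        · rw [pvRunStep_true t b c x hx]; dsimp only; split <;> omega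
        · rw [pvRunStep_false t b c x hx]; dsimp only; split <;> omega
      refine le_trans h2 ?_
      have h3 := ih (pvRunStep t (b, c) x).1 (pvRunStep t (b, c) x).2
      simpa using h3

-- A's early-return loop equals B's longest-run scan with threshold t,
-- given that set membership agrees with the threshold test on every element of the list.
theorem pvLoopA_eq_fold (s : PySem.Set Int) (t : Int) (n : Int) :
    ∀ (xs : List Int) (b c : Int),
      (∀ x ∈ xs, PySem.Set.contains s x = decide (t ≤ x)) →
      0 ≤ b → b < n →
      pvLoopA s n xs c = decide (n ≤ (xs.foldl (pvRunStep t) (b, c)).1) := by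
  intro xs
  induction xs with
  | nil =>
      intro b c _ _ hbn
      simp only [pvLoopA, List.foldl_nil]
      exact (decide_eq_false (not_le.mpr hbn)).symm
  | cons x xs ih =>
      intro b c hmem hb hbn
      have hx := hmem x (by simp)
      rw [List.foldl_cons]
      by_cases hp : t ≤ x
      · have hx' : PySem.Set.contains s x = true := by rw [hx]; simpa using hp
        simp only [pvLoopA, hx', if_true]
        by_cases hn : n ≤ c + 1
        · rw [if_pos hn]
          have h1 : c + 1 ≤ (xs.foldl (pvRunStep t) (pvRunStep t (b, c) x)).1 := by
            have h2 : c + 1 ≤ (pvRunStep t (b, c) x).1 := by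
              rw [pvRunStep_true t b c x hp]; dsimp only; split <;> omega
            refine le_trans h2 ?_
            have h3 := pvFoldB_fst_ge t xs (pvRunStep t (b, c) x).1 (pvRunStep t (b, c) x).2
            simpa using h3
          exact (decide_eq_true (le_trans hn h1)).symm
        · rw [if_neg hn]
          simp only [pvRunStep_true t b c x hp]
          have h0 : 0 ≤ (if b < c + 1 then c + 1 else b) := by split <;> omega
          have h1 : (if b < c + 1 then c + 1 else b) < n := by split <;> omega
          exact ih _ (c + 1) (fun y hy => hmem y (by simp [hy])) h0 h1
      · have hx' : PySem.Set.contains s x = false := by rw [hx]; simpa using hp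
        simp only [pvLoopA, hx', if_false, Bool.false_eq_true]
        have hstep : pvRunStep t (b, c) x = (b, 0) := by
          rw [pvRunStep_false t b c x hp, if_neg (by omega)]
        simp only [hstep]
        exact ih b 0 (fun y hy => hmem y (by simp [hy])) hb hbn

-- the three-way partition of xs around p is a permutation of xs
theorem pv_partition_perm (p : Int) :
    ∀ (xs : List Int),
      (pvFilterGt p xs ++ xs.filter (fun y => decide (y = p)) ++ pvFilterLt p xs).Perm xs := by
  simp only [pvFilterGt, pvFilterLt]
  intro xs
  induction xs with
  | nil => simp
  | cons a xs ih =>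
      rcases lt_trichotomy p a with h | h | h
      · simp only [List.filter_cons, decide_eq_true h,
          decide_eq_false (show ¬ a = p by omega), decide_eq_false (show ¬ a < p by omega),
          if_true, Bool.false_eq_true, if_false, List.cons_append]
        exact ih.cons a
      · have he : a = p := h.symm
        simp only [List.filter_cons, decide_eq_false (show ¬ p < a by omega),
          decide_eq_true he, decide_eq_false (show ¬ a < p by omega),
          if_true, Bool.false_eq_true, if_false]
        refine List.Perm.trans ?_ (ih.cons a)
        rw [List.append_assoc, List.cons_append, List.append_assoc]
        exact List.perm_middle
      · simp only [List.filter_cons, decide_eq_false (show ¬ p < a by omega),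
          decide_eq_false (show ¬ a = p by omega), decide_eq_true h,
          if_true, Bool.false_eq_true, if_false]
        refine List.Perm.trans ?_ (ih.cons a)
        exact List.perm_middle

-- a list whose elements are all p is pairwise-descending, and every entry reads p
theorem pv_const_pairwise (p : Int) (l : List Int) (h : ∀ y ∈ l, y = p) :
    l.Pairwise (fun a b => b ≤ a) := by
  rw [List.pairwise_iff_getElem]
  intro i j hi hj _
  rw [h _ (List.getElem_mem _), h _ (List.getElem_mem _)]

-- every entry of such a constant list reads p
theorem pv_const_getD (p : Int) (l : List Int) (h : ∀ y ∈ l, y = p)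
    (i : Nat) (hi : i < l.length) : l.getD i 0 = p := by
  rw [List.getD_eq_getElem l 0 hi]
  exact h _ (List.getElem_mem _)

-- the descending sort of xs decomposes along the three-way partition around p
theorem pv_sorted_decomp (p : Int) (xs : List Int) :
    PySem.List.sorted xs (fun x => x) true =
      PySem.List.sorted (pvFilterGt p xs) (fun x => x) true ++
      xs.filter (fun y => decide (y = p)) ++
      PySem.List.sorted (pvFilterLt p xs) (fun x => x) true := by
  haveI : Std.Antisymm (fun a b : Int => b ≤ a) := ⟨fun a b h1 h2 => le_antisymm h2 h1⟩
  have hperm : (PySem.List.sorted xs (fun x => x) true).Perm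
      (PySem.List.sorted (pvFilterGt p xs) (fun x => x) true ++
        xs.filter (fun y => decide (y = p)) ++
        PySem.List.sorted (pvFilterLt p xs) (fun x => x) true) := by
    refine (PySem.List.sorted_perm xs (fun x => x) true).trans ?_
    refine ((pv_partition_perm p xs).symm).trans ?_
    exact List.Perm.append
      (List.Perm.append (PySem.List.sorted_perm _ (fun x => x) true).symm (List.Perm.refl _))
      (PySem.List.sorted_perm _ (fun x => x) true).symm
  refine List.Perm.eq_of_pairwise' (PySem.List.sorted_pairwise_rev ..) ?_ hperm
  rw [List.append_assoc, List.pairwise_append]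
  refine ⟨PySem.List.sorted_pairwise_rev .., ?_, ?_⟩
  · rw [List.pairwise_append]
    refine ⟨pv_const_pairwise p _ (fun y hy => by simpa using (List.mem_filter.mp hy).2),
      PySem.List.sorted_pairwise_rev .., ?_⟩
    intro a ha b hb
    have ha' : a = p := by simpa using (List.mem_filter.mp ha).2
    have hb' : b < p := by
      rw [PySem.List.mem_sorted] at hb
      simpa [pvFilterLt] using (List.mem_filter.mp hb).2
    omega
  · intro a ha b hb
    have ha' : p < a := by
      rw [PySem.List.mem_sorted] at ha
      simpa [pvFilterGt] using (List.mem_filter.mp ha).2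
    rcases List.mem_append.mp hb with hb | hb
    · have hb' : b = p := by simpa using (List.mem_filter.mp hb).2
      omega
    · have hb' : b < p := by
        rw [PySem.List.mem_sorted] at hb
        simpa [pvFilterLt] using (List.mem_filter.mp hb).2
      omega

-- quickselect computes the k-th entry of the descending sort
theorem pvNthLargest_eq (m : Nat) :
    ∀ (xs : List Int) (k : Nat), xs.length ≤ m → k < xs.length →
      pvNthLargest xs k = (PySem.List.sorted xs (fun x => x) true).getD k 0 := by
  induction m with
  | zero => intro xs k h1 h2; omega
  | succ m ih =>
      intro xs k hlen hk
      have hne : ¬ xs.length = 0 := by omega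
      rw [pvNthLargest, dif_neg hne]
      set p := xs.getD (xs.length / 2) 0 with hp
      have hpmem : p ∈ xs := pvPivot_mem xs hne
      have hglt : (pvFilterGt p xs).length < xs.length := pvFilterGt_length_lt p xs hpmem
      have hllt : (pvFilterLt p xs).length < xs.length := pvFilterLt_length_lt p xs hpmem
      have hcnt : xs.countP (fun y => decide (y = p)) =
          (xs.filter (fun y => decide (y = p))).length := List.countP_eq_length_filter
      have hsum : (pvFilterGt p xs).length + ((xs.filter (fun y => decide (y = p))).length +
          (pvFilterLt p xs).length) = xs.length := by
        simpa using (pv_partition_perm p xs).length_eq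
      have hdec := pv_sorted_decomp p xs
      have hlg : (PySem.List.sorted (pvFilterGt p xs) (fun x => x) true).length =
          (pvFilterGt p xs).length := PySem.List.length_sorted ..
      have hll : (PySem.List.sorted (pvFilterLt p xs) (fun x => x) true).length =
          (pvFilterLt p xs).length := PySem.List.length_sorted ..
      rw [hdec, List.append_assoc]
      by_cases h1 : k < (pvFilterGt p xs).length
      · rw [if_pos h1, ih (pvFilterGt p xs) k (by omega) h1]
        rw [List.getD_append _ _ 0 k (by omega)]
      · rw [if_neg h1]
        rw [List.getD_append_right _ _ 0 k (by omega)]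
        by_cases h2 : k < (pvFilterGt p xs).length + xs.countP (fun y => decide (y = p))
        · rw [if_pos h2]
          rw [hcnt] at h2
          rw [List.getD_append _ _ 0 _ (by omega)]
          exact (pv_const_getD p _ (fun y hy => by simpa using (List.mem_filter.mp hy).2)
            _ (by omega)).symm
        · rw [if_neg h2]
          rw [hcnt] at h2 ⊢
          rw [List.getD_append_right _ _ 0 _ (by omega)]
          have hk' : k - ((pvFilterGt p xs).length +
              (xs.filter (fun y => decide (y = p))).length) < (pvFilterLt p xs).length := by
            omega
          rw [ih (pvFilterLt p xs) _ (by omega) hk']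
          congr 1
          omega

-- membership in the top-n slice of the descending sort is the threshold test
theorem pv_mem_take_iff (d : List Int) (k : Nat) (hk : 1 ≤ k) (hkd : k ≤ d.length)
    (hsort : d.Pairwise (fun a b => b ≤ a)) (x : Int) (hx : x ∈ d) :
    (x ∈ d.take k ↔ d[k - 1]'(by omega) ≤ x) := by
  have hpair := List.pairwise_iff_getElem.mp hsort
  constructor
  · intro hxt
    obtain ⟨i, hi, hix⟩ := List.mem_take_iff_getElem.mp hxt
    have hi' : i < k := by omega
    rcases Nat.lt_or_ge i (k - 1) with h | h
    · have := hpair i (k - 1) (by omega) (by omega) h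
      omega
    · have : i = k - 1 := by omega
      subst this
      omega
  · intro hle
    obtain ⟨j, hj, hjx⟩ := List.mem_iff_getElem.mp hx
    rcases Nat.lt_or_ge j k with h | h
    · exact List.mem_take_iff_getElem.mpr ⟨j, by omega, hjx⟩
    · have hjk : d[j] ≤ d[k - 1]'(by omega) := by
        rcases Nat.lt_or_ge (k - 1) j with h2 | h2
        · exact hpair (k - 1) j (by omega) hj h2
        · have : j = k - 1 := by omega
          subst this; exact le_refl _
      have hxe : x = d[k - 1]'(by omega) := by omega
      exact List.mem_take_iff_getElem.mpr ⟨k - 1, by omega, hxe.symm⟩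

-- ===== VERDICT (by name: the statement is the Claim_ definition above) =====
theorem sublist_largest_values_exists_spec : Claim_equal_sublist_largest_values_exists := by
  intro lst n _ hpre
  unfold Spec_sublist_largest_values_exists
  unfold Pre_sublist_largest_values_exists at hpre
  unfold sublist_largest_values_exists sublist_largest_values_exists_alt
  set d := PySem.List.sorted lst (fun x => x) true with hd
  have hlend : d.length = lst.length := PySem.List.length_sorted ..
  have hpairs : d.Pairwise (fun a b => b ≤ a) := by
    rw [hd]; exact PySem.List.sorted_pairwise_rev ..
  by_cases h0 : n = 0
  · subst h0
    rw [if_pos (by left; exact le_refl 0)]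
    apply pvLoopA_of_none
    intro x _
    have : PySem.List.slice d none (some 0) = [] := by
      rw [PySem.List.slice_to d (le_refl 0)]; simp
    simp [this, PySem.Set.contains, PySem.Set.ofList]
  · have h1 : 1 ≤ n := by omega
    by_cases hbig : (lst.length : Int) < n
    · rw [if_pos (by right; exact hbig)]
      exact pvLoopA_short _ n lst 0 (le_refl 0) (by omega)
    · rw [if_neg (by omega)]
      have hk1 : 1 ≤ n.toNat := by omega
      have hkd : n.toNat ≤ d.length := by omega
      have hkk : (n - 1).toNat = n.toNat - 1 := by omega
      have ht : pvNthLargest lst (n - 1).toNat = d[n.toNat - 1]'(by omega) := by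
        rw [pvNthLargest_eq lst.length lst (n - 1).toNat (le_refl _) (by omega), ← hd, hkk]
        exact List.getD_eq_getElem d 0 (by omega)
      rw [ht]
      have hslice : PySem.List.slice d none (some n) = d.take n.toNat := by
        rw [PySem.List.slice_to d (by omega)]
      apply pvLoopA_eq_fold _ _ n lst 0 0 _ (le_refl 0) (by omega)
      intro x hxl
      have hxd : x ∈ d := by rw [hd, PySem.List.mem_sorted]; exact hxl
      apply Bool.eq_iff_iff.mpr
      rw [PySem.Set.contains_iff, PySem.Set.mem_ofList, decide_eq_true_iff, hslice]
      exact pv_mem_take_iff d n.toNat hk1 hkd hpairs x hxd
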